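-- pv_equiv track=rewrite | github.com/erksch/fnet-pytorch | training/data_preparation.py | concat_lines_until_max
-- ===== SOURCE A (Python) =====
-- def concat_lines_until_max(lines, max_len):
--     cum_len = 0
--     k = 0
--     for k in range(len(lines)):
--         cum_len += len(lines[k])
--         if cum_len > max_len - 3:
--             k -= 1
--             break
--     return lines[:k + 1]
-- ===== SOURCE B (Python) =====
-- from itertools import accumulate
--
--
-- def concat_lines_until_max(lines, max_len):
--     prefix = list(accumulate(len(line) for line in lines))
--     cut = sum(1 for p in prefix if p <= max_len - 3)
--     return lines[:cut]
-- ===== Notes on version B (the rewrite author's own statement) =====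
-- stated objective: alternative
-- what changed: Replaces the early-exit index loop with a prefix-sum table built by itertools.accumulate, a count of the entries within the threshold (valid because the prefix sums are nondecreasing), and one slice.
import Mathlib
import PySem

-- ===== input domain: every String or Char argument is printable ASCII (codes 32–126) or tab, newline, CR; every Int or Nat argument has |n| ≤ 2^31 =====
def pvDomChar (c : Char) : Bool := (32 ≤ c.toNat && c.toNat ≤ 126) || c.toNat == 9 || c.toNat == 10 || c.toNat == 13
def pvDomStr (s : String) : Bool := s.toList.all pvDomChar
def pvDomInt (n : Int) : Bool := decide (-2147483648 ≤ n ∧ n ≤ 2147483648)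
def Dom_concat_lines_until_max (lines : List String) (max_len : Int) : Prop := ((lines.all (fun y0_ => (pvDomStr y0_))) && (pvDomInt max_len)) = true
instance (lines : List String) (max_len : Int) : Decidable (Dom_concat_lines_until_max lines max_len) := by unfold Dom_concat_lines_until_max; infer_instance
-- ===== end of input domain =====

-- B replaces A's early-exit scan by a prefix-sum table, a count of entries within the
-- threshold, and one slice (alternative decomposition; same O(n) cost).

-- ===== PORT A =====
-- A's for-loop over range(len(lines)): k is the loop index, cum the running length;
-- on break it returns k-1; when the loop ends normally k is the last index (or stays 0
-- on an empty list, exactly as Python leaves the loop variable).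
def concatLoopA (ml : Int) : List String → Nat → Int → Int
  | [], k, _ => if k = 0 then 0 else (k : Int) - 1
  | s :: rest, k, cum =>
    let cum' := cum + (s.length : Int)
    if ml - 3 < cum' then (k : Int) - 1
    else concatLoopA ml rest (k + 1) cum'

def concat_lines_until_max (lines : List String) (max_len : Int) : List String :=
  let k := concatLoopA max_len lines 0 0
  PySem.List.slice lines none (some (k + 1))

-- ===== PORT B =====
-- itertools.accumulate on the list of line lengths
def pyAccumulate : Int → List Int → List Int
  | _, [] => []
  | acc, x :: xs => (acc + x) :: pyAccumulate (acc + x) xs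

def concat_lines_until_max_alt (lines : List String) (max_len : Int) : List String :=
  let pfx := pyAccumulate 0 (lines.map (fun line => (line.length : Int)))
  let cut := (pfx.filter (fun p => decide (p ≤ max_len - 3))).length
  lines.take cut

-- ===== PRECONDITION & SPEC =====
def Spec_concat_lines_until_max (lines : List String) (max_len : Int) (out : List String) : Prop := out = concat_lines_until_max_alt lines max_len
instance (lines : List String) (max_len : Int) (out : List String) : Decidable (Spec_concat_lines_until_max lines max_len out) := by unfold Spec_concat_lines_until_max; infer_instance

-- ===== CLAIM (what is proved, stated in full; the proofs are below) =====
def Claim_equal_concat_lines_until_max : Prop := ∀ (lines : List String) (max_len : Int), Dom_concat_lines_until_max lines max_len → Spec_concat_lines_until_max lines max_len (concat_lines_until_max lines max_len)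

-- ===== LEMMAS AND PROOFS =====

-- number of leading lines whose running length (started at c) stays ≤ M
def pvCnt (M : Int) : Int → List String → Nat
  | _, [] => 0
  | c, s :: r => if M < c + (s.length : Int) then 0 else 1 + pvCnt M (c + (s.length : Int)) r

theorem concatLoopA_eq (ml : Int) :
    ∀ (l : List String) (k : Nat) (c : Int), 0 < k ∨ l ≠ [] →
      concatLoopA ml l k c = (k : Int) + (pvCnt (ml - 3) c l : Int) - 1 := by
  intro l
  induction l with
  | nil =>
      intro k c h
      have hk : k ≠ 0 := by
        rcases h with h | h
        · omega
        · exact absurd rfl h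
      simp [concatLoopA, pvCnt, hk]
  | cons s rest ih =>
      intro k c _
      by_cases hb : ml - 3 < c + (s.length : Int)
      · simp [concatLoopA, pvCnt, hb]
      · have := ih (k + 1) (c + (s.length : Int)) (Or.inl (by omega))
        simp [concatLoopA, pvCnt, hb, this]
        ring

theorem filter_accum_nil (M : Int) :
    ∀ (l : List String) (c : Int), M < c →
      (pyAccumulate c (l.map (fun s => (s.length : Int)))).filter (fun p => decide (p ≤ M)) = [] := by
  intro l
  induction l with
  | nil => intro c _; simp [pyAccumulate]
  | cons s rest ih =>
      intro c hc
      have h1 : M < c + (s.length : Int) := by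
        have : (0 : Int) ≤ (s.length : Int) := Int.natCast_nonneg _
        omega
      simp [pyAccumulate, Int.not_le.mpr h1, ih _ h1]

theorem filter_accum_len (M : Int) :
    ∀ (l : List String) (c : Int),
      ((pyAccumulate c (l.map (fun s => (s.length : Int)))).filter (fun p => decide (p ≤ M))).length
        = pvCnt M c l := by
  intro l
  induction l with
  | nil => intro c; simp [pyAccumulate, pvCnt]
  | cons s rest ih =>
      intro c
      by_cases hb : M < c + (s.length : Int)
      · simp [pyAccumulate, pvCnt, hb, Int.not_le.mpr hb, filter_accum_nil M rest _ hb]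
      · have hle : c + (s.length : Int) ≤ M := Int.not_lt.mp hb
        simp [pyAccumulate, pvCnt, hb, hle, ih]
        omega

-- ===== VERDICT (by name: the statement is the Claim_ definition above) =====
theorem concat_lines_until_max_spec : Claim_equal_concat_lines_until_max := by
  intro lines max_len _
  unfold Spec_concat_lines_until_max concat_lines_until_max concat_lines_until_max_alt
  show PySem.List.slice lines none (some (concatLoopA max_len lines 0 0 + 1))
      = List.take ((List.filter (fun p => decide (p ≤ max_len - 3))
          (pyAccumulate 0 (lines.map (fun line => (line.length : Int))))).length) lines
  rw [filter_accum_len (max_len - 3) lines 0]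
  cases lines with
  | nil => simp [concatLoopA, PySem.List.slice]
  | cons s rest =>
      rw [concatLoopA_eq max_len (s :: rest) 0 0 (Or.inr (by simp))]
      have h : (((0 : Nat) : Int) + (pvCnt (max_len - 3) 0 (s :: rest) : Int) - 1) + 1
          = ((pvCnt (max_len - 3) 0 (s :: rest) : Int)) := by push_cast; ring
      rw [h, PySem.List.slice_to_natCast]
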